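-- pv_equiv track=rewrite | github.com/malk1510/CAD-Tools-for-VLSI-Design | espresso.py | tautology
-- ===== SOURCE A (Python) =====
-- def tautology(cov):
-- 	if(len(cov) == 0):
-- 		return False
--
-- 	#If there is only one literal, we stop the recursion.
-- 	if(len(cov[0]) == 2):
-- 		s1 = 0
-- 		s2 = 0
-- 		for i in cov:
-- 			s1 += i[0]
-- 			s2 += i[1]
-- 		if((s1==0) or (s2==0)):
-- 			return False
-- 		else:
-- 			return True
-- 	x1 = []
-- 	x2 = []
--
-- 	#This part of the function simply iterates through the cover to check for all cubes which would be in either the cofactor of one literal, or that of the not of that literal.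
-- 	for i in cov:
-- 		if i[0]==0:
-- 			x1.append(i[2:])
-- 		elif i[1]==0:
-- 			x2.append(i[2:])
-- 		else:
-- 			x1.append(i[2:])
-- 			x2.append(i[2:])
-- 	if((tautology(x1)) and (tautology(x2))):
-- 		return True
-- 	return False
-- ===== SOURCE B (Python) =====
-- def tautology(cov):
--     # Iterative DFS over an explicit stack; cofactors built by filtering
--     # comprehensions rather than an appending loop; first failing leaf
--     # (same left-to-right order as the recursion) returns False.
--     stack = [cov]
--     while stack:
--         c = stack.pop()
--         if not c:
--             return False
--         if len(c[0]) == 2: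
--             if sum(i[0] for i in c) == 0 or sum(i[1] for i in c) == 0:
--                 return False
--         else:
--             stack.append([i[2:] for i in c if i[0] != 0])
--             stack.append([i[2:] for i in c if i[0] == 0 or i[1] != 0])
--     return True
-- ===== Notes on version B (the rewrite author's own statement) =====
-- stated objective: alternative
-- what changed: Replaced the recursive cofactor-split by an iterative depth-first search over an explicit stack, with the cofactors produced by filtering comprehensions and the base-case column sums by sum() instead of A's appending and accumulating loops.
-- outside the precondition, e.g. on tautology([[1, 0, 5]]): A returns False, B returns False; on tautology([[1, 1, 1, 1], [1, 1, 1, 1, 1]]): A returns True, B returns True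
import Mathlib
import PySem

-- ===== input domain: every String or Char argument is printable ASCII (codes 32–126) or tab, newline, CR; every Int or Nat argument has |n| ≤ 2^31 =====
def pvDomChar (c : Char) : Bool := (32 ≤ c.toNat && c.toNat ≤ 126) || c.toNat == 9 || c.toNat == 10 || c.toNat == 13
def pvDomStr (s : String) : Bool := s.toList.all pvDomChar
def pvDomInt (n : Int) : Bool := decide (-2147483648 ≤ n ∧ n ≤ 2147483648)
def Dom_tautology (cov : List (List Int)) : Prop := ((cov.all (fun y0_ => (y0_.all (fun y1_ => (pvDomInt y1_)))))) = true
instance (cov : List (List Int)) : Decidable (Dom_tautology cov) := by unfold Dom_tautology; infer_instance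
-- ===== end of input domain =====

-- B replaces A's recursion by an iterative explicit-stack depth-first search whose
-- cofactors are filtering comprehensions and whose base sums use sum(); equal return
-- values on Pre_.

-- ===== PORT A =====
-- A's cofactor loop: one pass appending i[2:] to x1 / x2 / both.
-- i[0] / i[1] ported as pyGetD _ _ 0, exact on Pre_ (every cube has length ≥ 2);
-- i[2:] is List.drop 2 (exact for a nonnegative start slice).
def pvCofA (c : List (List Int)) : List (List Int) × List (List Int) :=
  c.foldl (fun x i =>
    if PySem.List.pyGetD i 0 0 == 0 then (x.1 ++ [i.drop 2], x.2)
    else if PySem.List.pyGetD i 1 0 == 0 then (x.1, x.2 ++ [i.drop 2])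
    else (x.1 ++ [i.drop 2], x.2 ++ [i.drop 2])) ([], [])

-- A's recursion, with fuel only as a totality guard (never exhausted on Pre_).
def tautA : Nat → List (List Int) → Bool
  | 0, _ => false
  | f + 1, cov =>
    if cov.length == 0 then false
    else if (cov.headD []).length == 2 then
      -- A's single loop accumulating both sums
      let s := cov.foldl
        (fun s i => (s.1 + PySem.List.pyGetD i 0 0, s.2 + PySem.List.pyGetD i 1 0))
        ((0 : Int), (0 : Int))
      if s.1 == 0 || s.2 == 0 then false else true
    else
      tautA f (pvCofA cov).1 && tautA f (pvCofA cov).2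

def tautology (cov : List (List Int)) : Bool :=
  tautA ((cov.headD []).length + 1) cov

-- ===== PORT B =====
-- B's filtering comprehensions [i[2:] for i in c if …]
def pvX1 (c : List (List Int)) : List (List Int) :=
  (c.filter (fun i => PySem.List.pyGetD i 0 0 == 0 || PySem.List.pyGetD i 1 0 != 0)).map
    (fun i => i.drop 2)
def pvX2 (c : List (List Int)) : List (List Int) :=
  (c.filter (fun i => PySem.List.pyGetD i 0 0 != 0)).map (fun i => i.drop 2)

-- B's while-loop over the explicit stack, with fuel only as a totality guard
-- (never exhausted on Pre_); stack.pop() from the front of the Lean list = Python's end.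
def tautB : Nat → List (List (List Int)) → Bool
  | 0, _ => false
  | f + 1, stack =>
    match stack with
    | [] => true
    | c :: rest =>
      if c.length == 0 then false
      else if (c.headD []).length == 2 then
        if (c.map (fun i => PySem.List.pyGetD i 0 0)).sum == 0
            || (c.map (fun i => PySem.List.pyGetD i 1 0)).sum == 0 then false
        else tautB f rest
      else tautB f (pvX1 c :: pvX2 c :: rest)

def tautology_alt (cov : List (List Int)) : Bool :=
  tautB (2 ^ ((cov.headD []).length + 1)) [cov]

-- ===== PRECONDITION & SPEC =====
-- Pre_ excludes ragged or odd-width covers (cube lengths not all equal and even, apart from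
-- the one-literal base case, which only needs every cube of length ≥ 2): on such inputs A's
-- raw index accesses generally raise IndexError somewhere in the recursion, and the few that
-- do return are values B matches anyway.
def Pre_tautology (cov : List (List Int)) : Prop :=
  cov = [] ∨
  ((cov.headD []).length = 2 ∧ ∀ x ∈ cov, 2 ≤ x.length) ∨
  (4 ≤ (cov.headD []).length ∧ (cov.headD []).length % 2 = 0 ∧
    ∀ x ∈ cov, x.length = (cov.headD []).length)
instance (cov : List (List Int)) : Decidable (Pre_tautology cov) := by
  unfold Pre_tautology; infer_instance

def pvWitness_tautology : List (List Int) := [[1, 1]]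

def Spec_tautology (cov : List (List Int)) (out : Bool) : Prop := out = tautology_alt cov
instance (cov : List (List Int)) (out : Bool) : Decidable (Spec_tautology cov out) := by
  unfold Spec_tautology; infer_instance

-- ===== CLAIM (what is proved, stated in full; the proofs are below) =====
def Claim_equal_tautology : Prop :=
  ∀ (cov : List (List Int)), Dom_tautology cov → Pre_tautology cov →
    Spec_tautology cov (tautology cov)

-- ===== LEMMAS AND PROOFS =====

-- the cover invariant maintained by the recursion: uniform even cube width, ≥ 2 when nonempty
def pvGood (c : List (List Int)) : Prop :=
  (∀ x ∈ c, x.length = (c.headD []).length) ∧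
  (c.headD []).length % 2 = 0 ∧ (c = [] ∨ 2 ≤ (c.headD []).length)

def pvLvl (c : List (List Int)) : Nat := (c.headD []).length / 2

def pvCost (c : List (List Int)) : Nat := 2 ^ (pvLvl c + 1) - 1

-- reference semantics, by structural recursion on the level
def pvModel : Nat → List (List Int) → Bool
  | 0, _ => false
  | 1, c =>
    if c.length == 0 then false
    else
      let s := c.foldl
        (fun s i => (s.1 + PySem.List.pyGetD i 0 0, s.2 + PySem.List.pyGetD i 1 0))
        ((0 : Int), (0 : Int))
      if s.1 == 0 || s.2 == 0 then false else true
  | n + 2, c =>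
    if c.length == 0 then false
    else pvModel (n + 1) (pvCofA c).1 && pvModel (n + 1) (pvCofA c).2

theorem pvModel_nil (n : Nat) : pvModel n [] = false := by
  match n with
  | 0 => rfl
  | 1 => rfl
  | n + 2 => rfl

-- A's paired sum loop computes the two column sums
theorem pvFoldl_pair (c : List (List Int)) (a b : Int) :
    c.foldl (fun s i => (s.1 + PySem.List.pyGetD i 0 0, s.2 + PySem.List.pyGetD i 1 0)) (a, b)
      = (a + (c.map (fun i => PySem.List.pyGetD i 0 0)).sum,
         b + (c.map (fun i => PySem.List.pyGetD i 1 0)).sum) := by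
  induction c generalizing a b with
  | nil => simp
  | cons h t ih => simp [List.foldl, ih]; constructor <;> ring

-- A's appending cofactor loop equals B's two filtering comprehensions
theorem pvCofA_split_aux (c : List (List Int)) (acc : List (List Int) × List (List Int)) :
    c.foldl (fun x i =>
      if PySem.List.pyGetD i 0 0 == 0 then (x.1 ++ [i.drop 2], x.2)
      else if PySem.List.pyGetD i 1 0 == 0 then (x.1, x.2 ++ [i.drop 2])
      else (x.1 ++ [i.drop 2], x.2 ++ [i.drop 2])) acc
      = (acc.1 ++ pvX1 c, acc.2 ++ pvX2 c) := by
  induction c generalizing acc with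
  | nil => simp [pvX1, pvX2]
  | cons h t ih =>
    simp only [List.foldl, ih]
    by_cases h0 : PySem.List.pyGetD h 0 0 = 0
    · simp [pvX1, pvX2, h0]
    · by_cases h1 : PySem.List.pyGetD h 1 0 = 0
      · simp [pvX1, pvX2, h0, h1]
      · simp [pvX1, pvX2, h0, h1]

theorem pvCofA_split (c : List (List Int)) : pvCofA c = (pvX1 c, pvX2 c) := by
  have := pvCofA_split_aux c ([], [])
  simpa [pvCofA] using this

theorem pvCof_mem (c : List (List Int)) (x : List Int)
    (hx : x ∈ (pvCofA c).1 ∨ x ∈ (pvCofA c).2) : ∃ i ∈ c, x = i.drop 2 := by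
  rw [pvCofA_split] at hx
  rcases hx with hx | hx <;>
  · simp only [pvX1, pvX2, List.mem_map, List.mem_filter] at hx
    obtain ⟨i, ⟨hi, _⟩, rfl⟩ := hx
    exact ⟨i, hi, rfl⟩

theorem pvHeadD_mem {α : Type} (l : List α) (d : α) (h : l ≠ []) : l.headD d ∈ l := by
  cases l with
  | nil => exact absurd rfl h
  | cons a t => simp

theorem pvGood_nil : pvGood [] := by
  refine ⟨by simp, by simp, Or.inl rfl⟩

-- length of every cube of a cofactor, and the resulting pvGood / pvLvl facts
theorem pvCof_good (c : List (List Int)) (hg : pvGood c) (h4 : 4 ≤ (c.headD []).length)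
    (side : List (List Int)) (hside : side = (pvCofA c).1 ∨ side = (pvCofA c).2) :
    pvGood side ∧ (side ≠ [] → (side.headD []).length = (c.headD []).length - 2) := by
  obtain ⟨hu, heven, _⟩ := hg
  have hlen : ∀ x ∈ side, x.length = (c.headD []).length - 2 := by
    intro x hx
    have hx' : x ∈ (pvCofA c).1 ∨ x ∈ (pvCofA c).2 := by
      rcases hside with h | h
      · exact Or.inl (h ▸ hx)
      · exact Or.inr (h ▸ hx)
    obtain ⟨i, hi, rfl⟩ := pvCof_mem c x hx'
    have := hu i hi
    simp [List.length_drop, this]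
  by_cases hne : side = []
  · subst hne; exact ⟨pvGood_nil, by simp⟩
  · have hhead : side.headD [] ∈ side := pvHeadD_mem side [] hne
    have hhl : (side.headD []).length = (c.headD []).length - 2 := hlen _ hhead
    refine ⟨⟨fun x hx => by rw [hlen x hx, hhl], ?_, ?_⟩, fun _ => hhl⟩
    · rw [hhl]; omega
    · right; omega

theorem pvA_model (n : Nat) : ∀ (f : Nat) (cov : List (List Int)), pvGood cov →
    (cov.headD []).length = 2 * n → n < f → tautA f cov = pvModel n cov := by
  induction n using Nat.strong_induction_on with
  | _ n ih =>
    intro f cov hg hlen hf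
    obtain ⟨f, rfl⟩ : ∃ f', f = f' + 1 := ⟨f - 1, by omega⟩
    match n, ih with
    | 0, ih =>
      obtain ⟨_, _, hc⟩ := hg
      have : cov = [] := by
        rcases hc with h | h
        · exact h
        · exact absurd hlen (by omega)
      subst this; rfl
    | 1, ih =>
      cases cov with
      | nil => rfl
      | cons h t =>
        simp only [List.headD_cons] at hlen
        simp [tautA, pvModel, hlen]
    | n + 2, ih =>
      cases cov with
      | nil => simp [tautA, pvModel_nil]
      | cons hd t =>
        simp only [List.headD_cons] at hlen
        have hstep : tautA (f + 1) (hd :: t)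
            = (tautA f (pvCofA (hd :: t)).1 && tautA f (pvCofA (hd :: t)).2) := by
          simp [tautA, hlen]
          try omega
        have hmodel : pvModel (n + 2) (hd :: t)
            = (pvModel (n + 1) (pvCofA (hd :: t)).1 && pvModel (n + 1) (pvCofA (hd :: t)).2) := by
          simp [pvModel]
        rw [hstep, hmodel]
        have hside : ∀ side, (side = (pvCofA (hd :: t)).1 ∨ side = (pvCofA (hd :: t)).2) →
            tautA f side = pvModel (n + 1) side := by
          intro side hs
          obtain ⟨hgs, hls⟩ := pvCof_good (hd :: t) hg (by simp [hlen]; omega) side hs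
          by_cases hnil : side = []
          · subst hnil
            obtain ⟨f, rfl⟩ : ∃ f', f = f' + 1 := ⟨f - 1, by omega⟩
            simp [tautA, pvModel_nil]
          · have : (side.headD []).length = 2 * (n + 1) := by
              rw [hls hnil]; simp [hlen]; omega
            exact ih (n + 1) (by omega) f side hgs this (by omega)
        rw [hside _ (Or.inl rfl), hside _ (Or.inr rfl)]

theorem pvCost_pos (c : List (List Int)) : 1 ≤ pvCost c := by
  unfold pvCost
  have : 2 ^ 1 ≤ 2 ^ (pvLvl c + 1) := Nat.pow_le_pow_right (by omega) (by omega)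
  omega

theorem pvB_model : ∀ (f : Nat) (stack : List (List (List Int))),
    (∀ c ∈ stack, pvGood c) → (stack.map pvCost).sum < f →
    tautB f stack = stack.all (fun c => pvModel (pvLvl c) c) := by
  intro f
  induction f with
  | zero => intro stack _ h; omega
  | succ f ih =>
    intro stack hg hf
    cases stack with
    | nil => rfl
    | cons c rest =>
      have hgc := hg c (by simp)
      have hgrest : ∀ d ∈ rest, pvGood d := fun d hd => hg d (by simp [hd])
      simp only [List.map_cons, List.sum_cons] at hf
      have hc1 := pvCost_pos c
      cases c with
      | nil =>
        simp [tautB, pvModel_nil, pvLvl]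
      | cons hd t =>
        obtain ⟨hu, heven, hge⟩ := hgc
        simp only [List.headD_cons] at heven hge hu
        by_cases h2 : hd.length = 2
        · -- base case
          have hlvl : pvLvl (hd :: t) = 1 := by simp [pvLvl, h2]
          have hrest := ih rest hgrest (by omega)
          simp only [tautB, List.length_cons, List.headD_cons, h2]
          simp only [List.all_cons, hlvl, pvModel, pvFoldl_pair]
          rw [hrest]
          simp only [List.length_cons, List.map_cons, List.sum_cons]
          split <;> simp_all
        · -- split case
          have h4 : 4 ≤ hd.length := by
            rcases hge with h | h
            · exact absurd h (by simp)
            · omega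
          obtain ⟨m, hm⟩ : ∃ m, hd.length = 2 * m + 4 := ⟨hd.length / 2 - 2, by omega⟩
          have hlvl : pvLvl (hd :: t) = m + 2 := by simp [pvLvl, hm]; omega
          have hgood : pvGood (hd :: t) := ⟨by simpa using hu, by simpa using heven,
            Or.inr (by simp; omega)⟩
          -- facts about the two cofactor sides
          have hside : ∀ side, (side = (pvCofA (hd :: t)).1 ∨ side = (pvCofA (hd :: t)).2) →
              pvGood side ∧ pvCost side ≤ 2 ^ (m + 2) - 1 ∧
                pvModel (pvLvl side) side = pvModel (m + 1) side := by
            intro side hs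
            obtain ⟨hgs, hls⟩ := pvCof_good (hd :: t) hgood (by simpa using h4) side hs
            by_cases hnil : side = []
            · subst hnil
              refine ⟨pvGood_nil, ?_, by simp [pvLvl, pvModel_nil]⟩
              have : 2 ^ 1 ≤ 2 ^ (m + 2) := Nat.pow_le_pow_right (by omega) (by omega)
              simp [pvCost, pvLvl]; omega
            · have hhl : (side.headD []).length = 2 * m + 2 := by
                rw [hls hnil]; simp [hm]
              have hlv : pvLvl side = m + 1 := by unfold pvLvl; rw [hhl]; omega
              refine ⟨hgs, ?_, by rw [hlv]⟩
              unfold pvCost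
              rw [hlv]
          obtain ⟨hg1, hc1', hm1⟩ := hside _ (Or.inl rfl)
          obtain ⟨hg2, hc2', hm2⟩ := hside _ (Or.inr rfl)
          have hcostc : pvCost (hd :: t) = 2 ^ (m + 3) - 1 := by
            rw [pvCost, hlvl]
          have hpow : 2 ^ (m + 3) = 2 ^ (m + 2) + 2 ^ (m + 2) := by ring
          have hstep : tautB (f + 1) ((hd :: t) :: rest)
              = tautB f ((pvCofA (hd :: t)).1 :: (pvCofA (hd :: t)).2 :: rest) := by
            simp only [tautB, List.length_cons, List.headD_cons]
            simp [h2, pvCofA_split]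
          rw [hstep]
          have hrec := ih ((pvCofA (hd :: t)).1 :: (pvCofA (hd :: t)).2 :: rest)
            (by intro d hd'
                simp only [List.mem_cons] at hd'
                rcases hd' with rfl | rfl | h
                · exact hg1
                · exact hg2
                · exact hgrest d h)
            (by simp only [List.map_cons, List.sum_cons]; omega)
          rw [hrec]
          simp only [List.all_cons, hlvl, hm1, hm2]
          have : pvModel (m + 2) (hd :: t)
              = (pvModel (m + 1) (pvCofA (hd :: t)).1 && pvModel (m + 1) (pvCofA (hd :: t)).2) := by
            simp [pvModel]
          rw [this, Bool.and_assoc]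

-- ===== VERDICT (by name: the statement is the Claim_ definition above) =====
theorem tautology_spec : Claim_equal_tautology := by
  intro cov _ hpre
  unfold Spec_tautology tautology tautology_alt
  rcases hpre with rfl | ⟨h2, hge⟩ | ⟨h4, heven, hu⟩
  · rfl
  · -- one-literal base case: both programs evaluate the same column sums once
    cases cov with
    | nil => simp at h2
    | cons hd t =>
      simp only [List.headD_cons] at h2 ⊢
      simp only [tautA, tautB, List.length_cons, List.headD_cons, h2]
      simp [pvFoldl_pair]
  · -- uniform even width ≥ 4: both sides equal the reference semantics
    have hgood : pvGood cov := ⟨hu, heven, Or.inr (by omega)⟩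
    obtain ⟨n, hn⟩ : ∃ n, (cov.headD []).length = 2 * n := ⟨(cov.headD []).length / 2, by omega⟩
    have hA := pvA_model n ((cov.headD []).length + 1) cov hgood hn (by omega)
    have hB := pvB_model (2 ^ ((cov.headD []).length + 1)) [cov]
      (by intro d hd; simp at hd; exact hd ▸ hgood)
      (by simp only [List.map_cons, List.map_nil, List.sum_cons, List.sum_nil]
          have h1 : pvLvl cov + 1 ≤ (cov.headD []).length + 1 := by
            simp [pvLvl]; omega
          have := Nat.pow_le_pow_right (show 1 ≤ 2 by omega) h1
          have h2 := pvCost_pos cov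
          simp only [pvCost] at *
          omega)
    rw [hA, hB]
    have hlv : pvLvl cov = n := by unfold pvLvl; omega
    simp [hlv]
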